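-- pv_equiv track=rewrite | github.com/alex1v1a/Magrathea-Backups | text_to_csv.py | parse_fixed_width
-- ===== SOURCE A (Python) =====
-- def parse_fixed_width(lines: list[str], widths: list[int], skip_empty: bool = True) -> list[list[str]]:
--     """Parse fixed-width text into rows using specified column widths."""
--     rows = []
--
--     for line in lines:
--         line = line.rstrip('\n\r')
--         if skip_empty and not line.strip():
--             continue
--
--         row = []
--         pos = 0
--         for width in widths:
--             field = line[pos:pos + width].strip()
--             row.append(field)
--             pos += width
--         rows.append(row)
--
--     return rows
-- ===== SOURCE B (Python) =====
-- def parse_fixed_width(lines: list[str], widths: list[int], skip_empty: bool = True) -> list[list[str]]: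
--     """Parse fixed-width text column by column: fill all rows for one column before the next."""
--     kept = [line.rstrip('\n\r') for line in lines]
--     if skip_empty:
--         kept = [line for line in kept if line.strip()]
--     rows = [[] for _ in kept]
--     pos = 0
--     for width in widths:
--         for row, line in zip(rows, kept):
--             row.append(line[pos:pos + width].strip())
--         pos += width
--     return rows
-- ===== Notes on version B (the rewrite author's own statement) =====
-- stated objective: alternative
-- what changed: B transposes the traversal: it cleans and filters the lines once, preallocates one row per kept line, then loops column-by-column (widths outer, lines inner), filling every row's k-th field before moving to the next column, instead of A's row-major loop with a per-line position accumulator.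
import Mathlib
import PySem

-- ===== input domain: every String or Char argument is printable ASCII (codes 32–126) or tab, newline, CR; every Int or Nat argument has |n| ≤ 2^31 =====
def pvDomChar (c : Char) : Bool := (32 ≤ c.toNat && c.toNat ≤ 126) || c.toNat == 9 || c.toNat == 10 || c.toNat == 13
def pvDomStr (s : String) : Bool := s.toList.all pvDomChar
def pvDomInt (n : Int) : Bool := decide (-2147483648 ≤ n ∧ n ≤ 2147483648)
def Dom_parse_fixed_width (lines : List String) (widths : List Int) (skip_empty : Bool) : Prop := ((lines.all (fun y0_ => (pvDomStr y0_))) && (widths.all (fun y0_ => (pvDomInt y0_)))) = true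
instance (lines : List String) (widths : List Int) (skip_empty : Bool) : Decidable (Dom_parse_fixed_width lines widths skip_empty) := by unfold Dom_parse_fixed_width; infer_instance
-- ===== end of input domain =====

-- B transposes the traversal (widths outer, lines inner: column-major fill of preallocated
-- rows) instead of A's row-major loop; objective: alternative, same cost.

-- exact model of Python's str.rstrip('\n\r') (PySem has no right-only chars-argument rstrip):
-- drop trailing '\n'/'\r' characters
def pvRstripNL (s : String) : List Char :=
  ((s.toList.reverse).dropWhile (fun c => c == '\n' || c == '\r')).reverse

-- ===== PORT A =====
def parse_fixed_width (lines : List String) (widths : List Int) (skip_empty : Bool) : List (List String) :=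
  lines.foldl (fun rows line0 =>
    let line := pvRstripNL line0
    if skip_empty && (PySem.Chars.strip line).isEmpty then rows
    else
      let rp := widths.foldl
        (fun (acc : List String × Int) width =>
          (acc.1 ++ [String.ofList (PySem.Chars.strip
              (PySem.List.slice line (some acc.2) (some (acc.2 + width))))],
           acc.2 + width)) ([], 0)
      rows ++ [rp.1]) []

-- ===== PORT B =====
-- Source B: kept = cleaned lines, filtered only when skip_empty
def pvKept (lines : List String) (skip_empty : Bool) : List (List Char) :=
  let kept := lines.map (fun line => pvRstripNL line)
  if skip_empty then kept.filter (fun line => !(PySem.Chars.strip line).isEmpty) else kept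

-- Source B's column loop: state = (rows, pos); each width appends one field to every row
def parse_fixed_width_alt (lines : List String) (widths : List Int) (skip_empty : Bool) : List (List String) :=
  let kept := pvKept lines skip_empty
  (widths.foldl
    (fun (acc : List (List String) × Int) width =>
      ((acc.1.zip kept).map (fun rl =>
          rl.1 ++ [String.ofList (PySem.Chars.strip
            (PySem.List.slice rl.2 (some acc.2) (some (acc.2 + width))))]),
       acc.2 + width))
    (kept.map (fun _ => ([] : List String)), 0)).1

-- ===== PRECONDITION & SPEC =====
def Spec_parse_fixed_width (lines : List String) (widths : List Int) (skip_empty : Bool) (out : List (List String)) : Prop := out = parse_fixed_width_alt lines widths skip_empty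
instance (lines : List String) (widths : List Int) (skip_empty : Bool) (out : List (List String)) : Decidable (Spec_parse_fixed_width lines widths skip_empty out) := by unfold Spec_parse_fixed_width; infer_instance

-- ===== CLAIM (what is proved, stated in full; the proofs are below) =====
def Claim_equal_parse_fixed_width : Prop := ∀ (lines : List String) (widths : List Int) (skip_empty : Bool), Dom_parse_fixed_width lines widths skip_empty → Spec_parse_fixed_width lines widths skip_empty (parse_fixed_width lines widths skip_empty)

-- ===== LEMMAS AND PROOFS =====

-- A's outer row-major fold = map of A's inner fold over the cleaned-and-filtered lines
theorem pvOuterA (widths : List Int) (skip_empty : Bool) :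
    ∀ (ls : List String) (r : List (List String)),
    ls.foldl (fun rows line0 =>
      let line := pvRstripNL line0
      if skip_empty && (PySem.Chars.strip line).isEmpty then rows
      else
        let rp := widths.foldl
          (fun (acc : List String × Int) width =>
            (acc.1 ++ [String.ofList (PySem.Chars.strip
                (PySem.List.slice line (some acc.2) (some (acc.2 + width))))],
             acc.2 + width)) ([], 0)
        rows ++ [rp.1]) r
    = r ++ ((ls.map (fun line => pvRstripNL line)).filter
         (fun l => !skip_empty || !(PySem.Chars.strip l).isEmpty)).map
         (fun line => (widths.foldl
            (fun (acc : List String × Int) width =>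
              (acc.1 ++ [String.ofList (PySem.Chars.strip
                  (PySem.List.slice line (some acc.2) (some (acc.2 + width))))],
               acc.2 + width)) ([], 0)).1) := by
  intro ls
  induction ls with
  | nil => intro r; simp
  | cons l0 ls ih =>
    intro r
    simp only [List.foldl_cons, List.map_cons, List.filter_cons]
    by_cases h : skip_empty && (PySem.Chars.strip (pvRstripNL l0)).isEmpty
    · have h' : (!skip_empty || !(PySem.Chars.strip (pvRstripNL l0)).isEmpty) = false := by
        simp_all
      simp only [h, if_true, h', ih]
      rfl
    · have h' : (!skip_empty || !(PySem.Chars.strip (pvRstripNL l0)).isEmpty) = true := by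
        rcases Bool.eq_false_or_eq_true skip_empty with hs | hs <;> simp_all
      simp only [h, h', ih]
      simp
-- B's kept list is exactly that cleaned-and-filtered list
theorem pvKept_eq (lines : List String) (skip_empty : Bool) :
    pvKept lines skip_empty
    = (lines.map (fun line => pvRstripNL line)).filter
        (fun l => !skip_empty || !(PySem.Chars.strip l).isEmpty) := by
  cases skip_empty <;> simp [pvKept]

-- column-major filling = row-major: after folding the widths, row i of B's state is exactly
-- A's inner fold run on kept line i (g = the rows built so far, p = the running position)
theorem pvCol (kept : List (List Char)) : ∀ (ws : List Int) (g : List Char → List String) (p : Int),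
    (ws.foldl
      (fun (acc : List (List String) × Int) width =>
        ((acc.1.zip kept).map (fun rl =>
            rl.1 ++ [String.ofList (PySem.Chars.strip
              (PySem.List.slice rl.2 (some acc.2) (some (acc.2 + width))))]),
         acc.2 + width))
      (kept.map g, p)).1
    = kept.map (fun line => (ws.foldl
        (fun (acc : List String × Int) width =>
          (acc.1 ++ [String.ofList (PySem.Chars.strip
              (PySem.List.slice line (some acc.2) (some (acc.2 + width))))],
           acc.2 + width)) (g line, p)).1) := by
  intro ws
  induction ws with
  | nil => intro g p; simp
  | cons w ws ih =>
    intro g p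
    simp only [List.foldl_cons]
    have hzip : (kept.map g).zip kept = kept.map (fun x => (g x, x)) := by
      have h : (kept.map g).zip (kept.map (id : List Char → List Char))
          = kept.map (fun a => (g a, id a)) := List.zip_map'
      simpa using h
    rw [hzip, List.map_map]
    exact ih (fun line => g line ++ [String.ofList (PySem.Chars.strip
        (PySem.List.slice line (some p) (some (p + w))))]) (p + w)

-- ===== VERDICT (by name: the statement is the Claim_ definition above) =====
theorem parse_fixed_width_spec : Claim_equal_parse_fixed_width := by
  intro lines widths skip_empty _
  unfold Spec_parse_fixed_width
  show parse_fixed_width lines widths skip_empty = parse_fixed_width_alt lines widths skip_empty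
  unfold parse_fixed_width parse_fixed_width_alt
  rw [pvOuterA widths skip_empty lines []]
  rw [pvCol (pvKept lines skip_empty) widths (fun _ => ([] : List String)) 0]
  rw [pvKept_eq]
  simp
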